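-- pv_equiv track=rewrite | github.com/mnemonicsloth/genomics_local | construct_synteny3_preserve_sequences.py | get_syntenic_segments
-- ===== SOURCE A (Python) =====
-- def get_syntenic_segments(gene_number_list):
--     gnl = gene_number_list
--     if gnl == []:
--         return []
--
--     safety = [x for x in gnl if type(x) == type("foo")]
--     if safety != []:
--         raise Exception(safety)
--
--     n = len(gnl)
--
--     def getdir(curr, prev):
--         diff = curr - prev
--         if diff in {1, -1}:
--             return diff
--         elif curr == 0 and prev == n-1:
--             return 1
--         elif curr == n-1 and prev == 0:
--             return -1
--         else:
--             return 0
--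
--     count = 1
--     seqs = []
--     for i in range(1,n):
--         dir = getdir(gnl[i], gnl[i-1])
--         if dir in {1, -1}:
--             count += 1
--         else:
--             seqs.append(count)
--             start = i
--             count = 1
--     seqs.append(count)
--
--     if getdir(gnl[0], gnl[-1]) in {1,-1} and len(seqs) > 1:
--         seqs[0] += seqs[-1]
--         return seqs[:-1]
--     else:
--         return seqs
-- ===== SOURCE B (Python) =====
-- def get_syntenic_segments(gene_number_list):
--     gnl = gene_number_list
--     if gnl == []:
--         return []
--
--     safety = [x for x in gnl if type(x) == type("foo")]
--     if safety != []:
--         raise Exception(safety)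
--
--     n = len(gnl)
--
--     def syntenic(curr, prev):
--         return (curr - prev in (1, -1)
--                 or (curr == 0 and prev == n - 1)
--                 or (curr == n - 1 and prev == 0))
--
--     breaks = [i for i in range(1, n) if not syntenic(gnl[i], gnl[i - 1])]
--     bounds = [0] + breaks + [n]
--     seqs = [b2 - b1 for b1, b2 in zip(bounds, bounds[1:])]
--
--     if syntenic(gnl[0], gnl[-1]) and len(seqs) > 1:
--         return [seqs[0] + seqs[-1]] + seqs[1:-1]
--     else:
--         return seqs
-- ===== Notes on version B (the rewrite author's own statement) =====
-- stated objective: alternative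
-- what changed: B replaces A's stateful running-count loop by computing the list of breakpoint indices and deriving segment lengths as successive differences of the boundary list (zero, then the breakpoints, then n); the circular merge rebuilds the result as first-plus-last followed by the middle instead of mutating slot zero and slicing.
import Mathlib
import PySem

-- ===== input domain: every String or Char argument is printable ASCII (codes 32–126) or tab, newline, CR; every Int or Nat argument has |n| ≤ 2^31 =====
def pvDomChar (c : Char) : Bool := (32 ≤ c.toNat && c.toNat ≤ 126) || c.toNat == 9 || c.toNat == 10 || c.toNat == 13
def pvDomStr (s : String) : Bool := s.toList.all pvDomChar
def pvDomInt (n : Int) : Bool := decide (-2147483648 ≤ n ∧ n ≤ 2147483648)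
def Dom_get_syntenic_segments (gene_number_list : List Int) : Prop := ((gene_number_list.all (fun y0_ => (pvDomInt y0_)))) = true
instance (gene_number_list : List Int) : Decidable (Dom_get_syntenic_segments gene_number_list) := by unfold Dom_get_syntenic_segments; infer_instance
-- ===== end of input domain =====

-- B replaces A's running-count loop by a breakpoint-index list whose boundary differences are the
-- segment lengths (different decomposition, same O(n) cost); return values proved equal on all inputs.
-- (A's str-safety filter is vacuous on List Int, so A never raises here and no Pre_ is needed.)

-- ===== PORT A =====
-- inner helper getdir(curr, prev); n is the closed-over len(gnl)
def pyGetdir (n curr prev : Int) : Int :=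
  let diff := curr - prev
  if diff = 1 ∨ diff = -1 then diff
  else if curr = 0 ∧ prev = n - 1 then 1
  else if curr = n - 1 ∧ prev = 0 then -1
  else 0

def get_syntenic_segments (gene_number_list : List Int) : List Int :=
  let gnl := gene_number_list
  if gnl = [] then []
  else
    -- safety = [x for x in gnl if type(x) == str] : always [] for a List Int, so the raise never fires
    let n : Int := PySem.List.len gnl
    let st :=
      (PySem.List.pyRange 1 n 1).foldl
        (fun (cs : Int × List Int) i =>
          let dir := pyGetdir n (PySem.List.pyGetD gnl i 0) (PySem.List.pyGetD gnl (i - 1) 0)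
          if dir = 1 ∨ dir = -1 then (cs.1 + 1, cs.2)
          else (1, cs.2 ++ [cs.1]))
        ((1 : Int), ([] : List Int))
    let seqs := st.2 ++ [st.1]
    let dir0 := pyGetdir n (PySem.List.pyGetD gnl 0 0) (PySem.List.pyGetD gnl (-1) 0)
    if (dir0 = 1 ∨ dir0 = -1) ∧ 1 < PySem.List.len seqs then
      let seqs' := PySem.List.pySetD seqs 0
        (PySem.List.pyGetD seqs 0 0 + PySem.List.pyGetD seqs (-1) 0)
      PySem.List.slice seqs' none (some (-1))
    else seqs

-- ===== PORT B =====
-- inner helper syntenic(curr, prev); n is the closed-over len(gnl)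
def synB (n curr prev : Int) : Bool :=
  (curr - prev == 1 || curr - prev == -1) || (curr == 0 && prev == n - 1) || (curr == n - 1 && prev == 0)

def get_syntenic_segments_alt (gene_number_list : List Int) : List Int :=
  let gnl := gene_number_list
  if gnl = [] then []
  else
    let n : Int := PySem.List.len gnl
    let breaks :=
      (PySem.List.pyRange 1 n 1).filter
        (fun i => !synB n (PySem.List.pyGetD gnl i 0) (PySem.List.pyGetD gnl (i - 1) 0))
    let bounds := (0 : Int) :: (breaks ++ [n])
    let seqs := (bounds.zip (PySem.List.slice bounds (some 1) none)).map (fun p => p.2 - p.1)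
    if synB n (PySem.List.pyGetD gnl 0 0) (PySem.List.pyGetD gnl (-1) 0) = true
        ∧ 1 < PySem.List.len seqs then
      (PySem.List.pyGetD seqs 0 0 + PySem.List.pyGetD seqs (-1) 0)
        :: PySem.List.slice seqs (some 1) (some (-1))
    else seqs

-- ===== PRECONDITION & SPEC =====
def Spec_get_syntenic_segments (gene_number_list : List Int) (out : List Int) : Prop := out = get_syntenic_segments_alt gene_number_list
instance (gene_number_list : List Int) (out : List Int) : Decidable (Spec_get_syntenic_segments gene_number_list out) := by unfold Spec_get_syntenic_segments; infer_instance

-- ===== CLAIM (what is proved, stated in full; the proofs are below) =====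
def Claim_equal_get_syntenic_segments : Prop := ∀ (gene_number_list : List Int), Dom_get_syntenic_segments gene_number_list → Spec_get_syntenic_segments gene_number_list (get_syntenic_segments gene_number_list)

-- ===== LEMMAS AND PROOFS =====

-- run lengths of a boolean adjacency list, A's way (count starts at c)
def runA : List Bool → Int → List Int
  | [], c => [c]
  | true :: bs, c => runA bs (c + 1)
  | false :: bs, c => c :: runA bs 1

-- 0-based positions of the `false` entries
def posF : List Bool → List Int
  | [] => []
  | b :: bs => (if b then [] else [(0 : Int)]) ++ (posF bs).map (· + 1)

def diffs (l : List Int) : List Int := (l.zip l.tail).map (fun p => p.2 - p.1)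

theorem getdir_iff (n c p : Int) :
    (pyGetdir n c p = 1 ∨ pyGetdir n c p = -1) ↔ synB n c p = true := by
  unfold pyGetdir synB
  split_ifs with h1 h2 <;> simp_all <;> omega

theorem foldlA_spec (bs : List Bool) (c : Int) (s : List Int) :
    (bs.foldl (fun (cs : Int × List Int) b =>
        if b then (cs.1 + 1, cs.2) else (1, cs.2 ++ [cs.1])) (c, s)).2
      ++ [(bs.foldl (fun (cs : Int × List Int) b =>
        if b then (cs.1 + 1, cs.2) else (1, cs.2 ++ [cs.1])) (c, s)).1]
    = s ++ runA bs c := by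
  induction bs generalizing c s with
  | nil => simp [runA]
  | cons b bs ih =>
    cases b with
    | true => simpa [runA] using ih (c + 1) s
    | false => simpa [runA] using ih 1 (s ++ [c])

theorem filter_posF (p : Int → Bool) (m : Nat) : ∀ (a : Int),
    (PySem.List.pyRange a (a + m) 1).filter (fun i => !p i)
      = (posF ((PySem.List.pyRange a (a + m) 1).map p)).map (· + a) := by
  induction m with
  | zero => intro a; simp [PySem.List.pyRange_one_eq_nil, posF]
  | succ k ih =>
    intro a
    have hab : a < a + (k + 1 : Nat) := by push_cast; omega
    rw [PySem.List.pyRange_one_cons hab]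
    have hsh : (a : Int) + 1 + k = a + (k + 1 : Nat) := by push_cast; ring
    have ihk := ih (a + 1)
    rw [hsh] at ihk
    cases hpa : p a with
    | true =>
      simp only [List.filter_cons, List.map_cons, posF, hpa, Bool.not_true, if_true, if_false,
        Bool.false_eq_true, List.nil_append]
      rw [ihk]
      simp only [List.map_map, Function.comp_def]
      apply List.map_congr_left; intro x _; ring
    | false =>
      simp only [List.filter_cons, List.map_cons, posF, hpa, Bool.not_false, if_true,
        List.cons_append, List.nil_append, List.map_cons]
      rw [ihk]
      simp [List.map_map, Function.comp_def]
      intro x _; ring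

theorem diffs_cons_cons (x y : Int) (l : List Int) :
    diffs (x :: y :: l) = (y - x) :: diffs (y :: l) := rfl

theorem diffs_boundaries (bs : List Bool) : ∀ (a c : Int),
    diffs (a :: ((posF bs).map (· + (a + c)) ++ [a + c + bs.length])) = runA bs c := by
  induction bs with
  | nil => intro a c; simp [posF, diffs, runA]
  | cons b bs ih =>
    intro a c
    cases b with
    | true =>
      have hmap : List.map (fun x => x + (a + c)) (List.map (fun x => x + 1) (posF bs))
          = List.map (fun x => x + (a + (c + 1))) (posF bs) := by
        simp only [List.map_map, Function.comp_def]
        apply List.map_congr_left; intro x _; ring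
      have hcast : a + c + ((bs.length : Int) + 1) = a + (c + 1) + bs.length := by ring
      simp only [posF, runA, if_true, List.nil_append, List.length_cons]
      push_cast
      rw [hmap, hcast]
      exact ih a (c + 1)
    | false =>
      simp only [posF, runA, List.length_cons]
      norm_num
      rw [diffs_cons_cons, show a + c - a = c from by ring,
          show (fun x => x + (1 + (a + c))) = (fun x : Int => x + ((a + c) + 1)) from by funext x; ring,
          show a + c + ((bs.length : Int) + 1) = (a + c) + 1 + bs.length from by ring,
          ih (a + c) 1]
theorem slice_tail (bounds : List Int) :
    PySem.List.slice bounds (some 1) none = bounds.tail :=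
  PySem.List.slice_from_one bounds

theorem zip_tail_diffs (l : List Int) :
    (l.zip l.tail).map (fun p => p.2 - p.1) = diffs l := rfl

theorem slice_one_negone (x : Int) (xs : List Int) (h : xs ≠ []) :
    PySem.List.slice (x :: xs) (some 1) (some (-1)) = xs.dropLast := by
  have hl : 0 < xs.length := List.length_pos_iff.mpr h
  simp only [PySem.List.slice, PySem.List.clampIdx]
  norm_num
  rw [List.dropLast_eq_take]
  congr 1

theorem slice_to_negone_cons (v : Int) (xs : List Int) (h : xs ≠ []) :
    PySem.List.slice (v :: xs) none (some (-1)) = v :: xs.dropLast := by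
  have hl : 0 < xs.length := List.length_pos_iff.mpr h
  simp only [PySem.List.slice, PySem.List.clampIdx]
  norm_num
  rw [if_neg (show ¬((xs.length : Int) < 0) from by omega)]
  rw [List.dropLast_eq_take]
  rw [List.take_cons (by omega)]

-- A's in-place merge (set slot 0, drop the last) equals B's rebuilt head-cons-middle list
theorem merge_vals (s : List Int) (h : 1 < s.length) :
    PySem.List.slice
        (PySem.List.pySetD s 0 (PySem.List.pyGetD s 0 0 + PySem.List.pyGetD s (-1) 0))
        none (some (-1))
      = (PySem.List.pyGetD s 0 0 + PySem.List.pyGetD s (-1) 0)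
          :: PySem.List.slice s (some 1) (some (-1)) := by
  obtain ⟨x, xs, rfl⟩ : ∃ x xs, s = x :: xs := by
    cases s with
    | nil => simp at h
    | cons x xs => exact ⟨x, xs, rfl⟩
  have hxs : xs ≠ [] := by intro hn; subst hn; simp at h
  have hset : PySem.List.pySetD (x :: xs) 0
      (PySem.List.pyGetD (x :: xs) 0 0 + PySem.List.pyGetD (x :: xs) (-1) 0)
      = (PySem.List.pyGetD (x :: xs) 0 0 + PySem.List.pyGetD (x :: xs) (-1) 0) :: xs := by
    simp [PySem.List.pySetD, PySem.List.pySet?, PySem.List.pyIdx?]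
  rw [hset, slice_to_negone_cons _ _ hxs, slice_one_negone _ _ hxs]

-- ===== VERDICT (by name: the statement is the Claim_ definition above) =====
theorem get_syntenic_segments_spec : Claim_equal_get_syntenic_segments := by
  intro gnl _
  unfold Spec_get_syntenic_segments get_syntenic_segments get_syntenic_segments_alt
  by_cases hnil : gnl = []
  · simp [hnil]
  · simp only [if_neg hnil]
    set n : Int := PySem.List.len gnl with hn
    have hn1 : (1 : Int) ≤ n := by
      have : 0 < gnl.length := List.length_pos_iff.mpr hnil
      simp [hn, PySem.List.len_eq]; omega
    set p : Int → Bool := fun i =>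
      synB n (PySem.List.pyGetD gnl i 0) (PySem.List.pyGetD gnl (i - 1) 0) with hp
    set bs : List Bool := (PySem.List.pyRange 1 n 1).map p with hbs
    -- A's seqs (before the merge) is runA bs 1
    have hA :
        ((PySem.List.pyRange 1 n 1).foldl
          (fun (cs : Int × List Int) i =>
            let dir := pyGetdir n (PySem.List.pyGetD gnl i 0) (PySem.List.pyGetD gnl (i - 1) 0)
            if dir = 1 ∨ dir = -1 then (cs.1 + 1, cs.2)
            else (1, cs.2 ++ [cs.1])) ((1 : Int), ([] : List Int))).2
        ++ [((PySem.List.pyRange 1 n 1).foldl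
          (fun (cs : Int × List Int) i =>
            let dir := pyGetdir n (PySem.List.pyGetD gnl i 0) (PySem.List.pyGetD gnl (i - 1) 0)
            if dir = 1 ∨ dir = -1 then (cs.1 + 1, cs.2)
            else (1, cs.2 ++ [cs.1])) ((1 : Int), ([] : List Int))).1]
        = runA bs 1 := by
      have hrw : ∀ (cs : Int × List Int) (i : Int),
          (let dir := pyGetdir n (PySem.List.pyGetD gnl i 0) (PySem.List.pyGetD gnl (i - 1) 0)
           if dir = 1 ∨ dir = -1 then (cs.1 + 1, cs.2) else (1, cs.2 ++ [cs.1]))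
          = (if p i then (cs.1 + 1, cs.2) else (1, cs.2 ++ [cs.1])) := by
        intro cs i
        show (if pyGetdir n (PySem.List.pyGetD gnl i 0) (PySem.List.pyGetD gnl (i - 1) 0) = 1
                ∨ pyGetdir n (PySem.List.pyGetD gnl i 0) (PySem.List.pyGetD gnl (i - 1) 0) = -1
              then (cs.1 + 1, cs.2) else (1, cs.2 ++ [cs.1])) = _
        by_cases hpi : p i = true
        · rw [if_pos ((getdir_iff n _ _).mpr hpi), if_pos hpi]
        · rw [if_neg (fun hc => hpi ((getdir_iff n _ _).mp hc)),
              if_neg (by simpa using hpi)]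
      calc _ = (bs.foldl (fun (cs : Int × List Int) b =>
              if b then (cs.1 + 1, cs.2) else (1, cs.2 ++ [cs.1])) ((1:Int), ([] : List Int))).2
            ++ [(bs.foldl (fun (cs : Int × List Int) b =>
              if b then (cs.1 + 1, cs.2) else (1, cs.2 ++ [cs.1])) ((1:Int), ([] : List Int))).1] := by
              rw [hbs, List.foldl_map]
              simp only [hrw]
        _ = runA bs 1 := by simpa using foldlA_spec bs 1 []
    -- B's seqs is diffs of the boundary list, which is runA bs 1 too
    have hB :
        ((((0:Int) :: (((PySem.List.pyRange 1 n 1).filter (fun i => !p i)) ++ [n])).zip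
          (PySem.List.slice ((0:Int) :: (((PySem.List.pyRange 1 n 1).filter (fun i => !p i)) ++ [n])) (some 1) none)).map
          (fun q => q.2 - q.1))
        = runA bs 1 := by
      rw [slice_tail, zip_tail_diffs]
      -- diffs of the boundary list
      obtain ⟨m, hm⟩ : ∃ m : Nat, n = 1 + (m : Int) := ⟨(n - 1).toNat, by omega⟩
      have hfil : ((PySem.List.pyRange 1 n 1).filter (fun i => !p i))
          = (posF bs).map (· + 1) := by
        rw [hbs, hm]
        exact filter_posF p m 1
      have hlenbs : (bs.length : Int) = n - 1 := by
        rw [hbs]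
        simp [PySem.List.length_pyRange_one]
        omega
      rw [hfil]
      rw [show ((posF bs).map (· + 1) ++ [n])
            = ((posF bs).map (· + ((0:Int) + 1)) ++ [(0:Int) + 1 + (bs.length : Int)]) from by
        simp; omega]
      exact diffs_boundaries bs 0 1
    rw [hA, hB]
    have hcond := getdir_iff n (PySem.List.pyGetD gnl 0 0) (PySem.List.pyGetD gnl (-1) 0)
    by_cases hc : synB n (PySem.List.pyGetD gnl 0 0) (PySem.List.pyGetD gnl (-1) 0) = true
    · by_cases hlen : 1 < PySem.List.len (runA bs 1)
      · rw [if_pos ⟨hcond.mpr hc, hlen⟩, if_pos ⟨hc, hlen⟩]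
        exact merge_vals _ (by simpa [PySem.List.len_eq] using hlen)
      · rw [if_neg (fun hx => hlen hx.2), if_neg (fun hx => hlen hx.2)]
    · rw [if_neg (fun hx => hc (hcond.mp hx.1)), if_neg (fun hx => hc hx.1)]
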